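-- pv_equiv track=rewrite | github.com/forsythetony/notion_place_inserter | app/custom_pipelines/neighborhood.py | _directional_conflict
-- ===== SOURCE A (Python) =====
-- _AXIS_SIGNS: dict[str, tuple[int | None, int | None]] = {
--     "north": (1, None),
--     "south": (-1, None),
--     "east": (None, 1),
--     "west": (None, -1),
--     "northeast": (1, 1),
--     "northwest": (1, -1),
--     "southeast": (-1, 1),
--     "southwest": (-1, -1),
-- }
--
-- def _directional_conflict(selected_tokens: set[str], context_tokens: set[str]) -> bool:
--     for selected in selected_tokens:
--         sel_lat, sel_lon = _AXIS_SIGNS.get(selected, (None, None))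
--         for ctx in context_tokens:
--             ctx_lat, ctx_lon = _AXIS_SIGNS.get(ctx, (None, None))
--             if sel_lat is not None and ctx_lat is not None and sel_lat != ctx_lat:
--                 return True
--             if sel_lon is not None and ctx_lon is not None and sel_lon != ctx_lon:
--                 return True
--     return False
-- ===== SOURCE B (Python) =====
-- _AXIS_SIGNS: dict[str, tuple[int | None, int | None]] = {
--     "north": (1, None),
--     "south": (-1, None),
--     "east": (None, 1),
--     "west": (None, -1),
--     "northeast": (1, 1),
--     "northwest": (1, -1),
--     "southeast": (-1, 1),
--     "southwest": (-1, -1),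
-- }
--
-- def _signs(tokens):
--     """One pass: which lat/lon signs occur among the tokens."""
--     lat_pos = lat_neg = lon_pos = lon_neg = False
--     for t in tokens:
--         la, lo = _AXIS_SIGNS.get(t, (None, None))
--         if la is not None:
--             if la > 0:
--                 lat_pos = True
--             else:
--                 lat_neg = True
--         if lo is not None:
--             if lo > 0:
--                 lon_pos = True
--             else:
--                 lon_neg = True
--     return lat_pos, lat_neg, lon_pos, lon_neg
--
-- def _directional_conflict(selected_tokens: set[str], context_tokens: set[str]) -> bool:
--     slp, sln, sop, son = _signs(selected_tokens)
--     clp, cln, cop, con = _signs(context_tokens)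
--     return (slp and cln) or (sln and clp) or (sop and con) or (son and cop)
-- ===== Notes on version B (the rewrite author's own statement) =====
-- stated objective: faster
-- what changed: Instead of comparing every selected token against every context token, B makes one pass over each set collecting which lat/lon signs occur per side, then decides conflict from those eight booleans.
import Mathlib
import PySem

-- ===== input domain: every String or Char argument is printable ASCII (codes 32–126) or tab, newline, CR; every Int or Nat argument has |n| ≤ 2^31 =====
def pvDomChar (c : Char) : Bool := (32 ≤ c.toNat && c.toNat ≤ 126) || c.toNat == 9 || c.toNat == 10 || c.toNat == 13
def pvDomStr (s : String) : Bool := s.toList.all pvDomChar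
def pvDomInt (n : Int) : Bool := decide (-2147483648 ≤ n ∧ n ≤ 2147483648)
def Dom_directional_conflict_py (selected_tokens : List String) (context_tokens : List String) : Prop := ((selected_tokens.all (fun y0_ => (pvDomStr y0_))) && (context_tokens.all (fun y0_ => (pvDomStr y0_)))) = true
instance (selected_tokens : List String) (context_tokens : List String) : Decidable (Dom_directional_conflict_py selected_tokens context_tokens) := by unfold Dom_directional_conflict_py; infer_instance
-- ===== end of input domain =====

-- B replaces A's nested all-pairs scan with one sign-collecting pass per side (faster, O(n+m) vs O(n*m)).

-- ===== PORT A =====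
-- shared module constant _AXIS_SIGNS, as a lookup function (dict with literal string keys)
def pvAxisSigns (t : String) : Option Int × Option Int :=
  if t = "north" then (some 1, none)
  else if t = "south" then (some (-1), none)
  else if t = "east" then (none, some 1)
  else if t = "west" then (none, some (-1))
  else if t = "northeast" then (some 1, some 1)
  else if t = "northwest" then (some 1, some (-1))
  else if t = "southeast" then (some (-1), some 1)
  else if t = "southwest" then (some (-1), some (-1))
  else (none, none)

-- A's inner loop over context_tokens (early return True becomes returning true)
def pvAInner (sel_lat sel_lon : Option Int) : List String → Bool
  | [] => false
  | ctx :: rest =>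
    let p := pvAxisSigns ctx
    if (match sel_lat, p.1 with | some a, some b => decide (a ≠ b) | _, _ => false) then true
    else if (match sel_lon, p.2 with | some a, some b => decide (a ≠ b) | _, _ => false) then true
    else pvAInner sel_lat sel_lon rest

-- A's outer loop over selected_tokens
def pvAOuter : List String → List String → Bool
  | [], _ => false
  | s :: rest, ctx =>
    let p := pvAxisSigns s
    if pvAInner p.1 p.2 ctx then true else pvAOuter rest ctx

def directional_conflict_py (selected_tokens : List String) (context_tokens : List String) : Bool :=
  pvAOuter selected_tokens context_tokens

-- ===== PORT B =====
-- B's _signs: one pass collecting (lat_pos, lat_neg, lon_pos, lon_neg)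
def pvSigns : List String → (Bool × Bool × Bool × Bool) → Bool × Bool × Bool × Bool
  | [], acc => acc
  | t :: rest, acc =>
    let p := pvAxisSigns t
    let acc1 :=
      match p.1 with
      | some a => if a > 0 then (true, acc.2.1, acc.2.2.1, acc.2.2.2) else (acc.1, true, acc.2.2.1, acc.2.2.2)
      | none => acc
    let acc2 :=
      match p.2 with
      | some a => if a > 0 then (acc1.1, acc1.2.1, true, acc1.2.2.2) else (acc1.1, acc1.2.1, acc1.2.2.1, true)
      | none => acc1
    pvSigns rest acc2

def directional_conflict_py_alt (selected_tokens : List String) (context_tokens : List String) : Bool :=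
  let s := pvSigns selected_tokens (false, false, false, false)
  let c := pvSigns context_tokens (false, false, false, false)
  (s.1 && c.2.1) || (s.2.1 && c.1) || (s.2.2.1 && c.2.2.2) || (s.2.2.2 && c.2.2.1)

-- ===== PRECONDITION & SPEC =====
def Spec_directional_conflict_py (selected_tokens : List String) (context_tokens : List String) (out : Bool) : Prop := out = directional_conflict_py_alt selected_tokens context_tokens
instance (selected_tokens : List String) (context_tokens : List String) (out : Bool) : Decidable (Spec_directional_conflict_py selected_tokens context_tokens out) := by unfold Spec_directional_conflict_py; infer_instance

-- ===== CLAIM (what is proved, stated in full; the proofs are below) =====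
def Claim_equal_directional_conflict_py : Prop := ∀ (selected_tokens : List String) (context_tokens : List String), Dom_directional_conflict_py selected_tokens context_tokens → Spec_directional_conflict_py selected_tokens context_tokens (directional_conflict_py selected_tokens context_tokens)

-- ===== LEMMAS AND PROOFS =====

-- which lat/lon signs a single token carries (branch shape mirrors pvSigns' update)
def pvLatP (t : String) : Bool := match (pvAxisSigns t).1 with | some a => if a > 0 then true else false | none => false
def pvLatN (t : String) : Bool := match (pvAxisSigns t).1 with | some a => if a > 0 then false else true | none => false
def pvLonP (t : String) : Bool := match (pvAxisSigns t).2 with | some a => if a > 0 then true else false | none => false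
def pvLonN (t : String) : Bool := match (pvAxisSigns t).2 with | some a => if a > 0 then false else true | none => false

lemma pvSigns_spec (ts : List String) (acc : Bool × Bool × Bool × Bool) :
    pvSigns ts acc =
      (acc.1 || ts.any pvLatP, acc.2.1 || ts.any pvLatN,
       acc.2.2.1 || ts.any pvLonP, acc.2.2.2 || ts.any pvLonN) := by
  induction ts generalizing acc with
  | nil => simp [pvSigns]
  | cons t rest ih =>
    obtain ⟨a1, a2, a3, a4⟩ := acc
    rcases h1 : (pvAxisSigns t).1 with _ | x <;> rcases h2 : (pvAxisSigns t).2 with _ | y <;>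
      simp only [pvSigns, h1, h2, ih, pvLatP, pvLatN, pvLonP, pvLonN, List.any_cons] <;>
      (try split_ifs) <;>
      simp_all

lemma pv_if_or (x y z : Bool) : (if x then true else if y then true else z) = (x || (y || z)) := by
  cases x <;> cases y <;> simp

lemma pv_if_or2 (x z : Bool) : (if x then true else z) = (x || z) := by
  cases x <;> simp

-- per-pair conflict test of A
def pvPair (s c : String) : Bool :=
  (match (pvAxisSigns s).1, (pvAxisSigns c).1 with | some a, some b => decide (a ≠ b) | _, _ => false) ||
  (match (pvAxisSigns s).2, (pvAxisSigns c).2 with | some a, some b => decide (a ≠ b) | _, _ => false)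

lemma pvAInner_spec (sl so : Option Int) (ctx : List String) :
    pvAInner sl so ctx =
      ctx.any (fun c =>
        (match sl, (pvAxisSigns c).1 with | some a, some b => decide (a ≠ b) | _, _ => false) ||
        (match so, (pvAxisSigns c).2 with | some a, some b => decide (a ≠ b) | _, _ => false)) := by
  induction ctx with
  | nil => simp [pvAInner]
  | cons c rest ih =>
    simp only [pvAInner, pv_if_or, List.any_cons, ih]
    rw [Bool.or_assoc]

lemma pvAOuter_spec (sel ctx : List String) :
    pvAOuter sel ctx = sel.any (fun s => ctx.any (fun c => pvPair s c)) := by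
  induction sel with
  | nil => simp [pvAOuter]
  | cons s rest ih =>
    simp only [pvAOuter, pv_if_or2, pvAInner_spec, List.any_cons, ih, pvPair]

-- any sign stored by _AXIS_SIGNS is 1 or -1
lemma pvAxisSigns_range1 (t : String) (a : Int) (h : (pvAxisSigns t).1 = some a) :
    a = 1 ∨ a = -1 := by
  unfold pvAxisSigns at h; split_ifs at h <;> simp_all
lemma pvAxisSigns_range2 (t : String) (a : Int) (h : (pvAxisSigns t).2 = some a) :
    a = 1 ∨ a = -1 := by
  unfold pvAxisSigns at h; split_ifs at h <;> simp_all

lemma pvPair_eq (s c : String) :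
    pvPair s c = ((pvLatP s && pvLatN c) || (pvLatN s && pvLatP c) ||
                  (pvLonP s && pvLonN c) || (pvLonN s && pvLonP c)) := by
  unfold pvPair pvLatP pvLatN pvLonP pvLonN
  rcases h1 : (pvAxisSigns s).1 with _ | a <;> rcases h2 : (pvAxisSigns c).1 with _ | b <;>
    rcases h3 : (pvAxisSigns s).2 with _ | x <;> rcases h4 : (pvAxisSigns c).2 with _ | y <;>
    [skip; skip; skip; skip; skip; skip; skip; skip; skip; skip; skip; skip; skip; skip; skip; skip] <;>
  · first
    | (try rcases pvAxisSigns_range1 s a h1 with rfl | rfl) <;>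
      (try rcases pvAxisSigns_range1 c b h2 with rfl | rfl) <;>
      (try rcases pvAxisSigns_range2 s x h3 with rfl | rfl) <;>
      (try rcases pvAxisSigns_range2 c y h4 with rfl | rfl) <;>
      decide

-- ===== VERDICT (by name: the statement is the Claim_ definition above) =====
theorem directional_conflict_py_spec : Claim_equal_directional_conflict_py := by
  intro sel ctx _
  unfold Spec_directional_conflict_py
  show directional_conflict_py sel ctx = _
  unfold directional_conflict_py directional_conflict_py_alt
  rw [pvAOuter_spec, pvSigns_spec, pvSigns_spec]
  simp only [pvPair_eq, Bool.false_or]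
  rw [Bool.eq_iff_iff]
  simp only [List.any_eq_true, Bool.or_eq_true, Bool.and_eq_true]
  constructor
  · rintro ⟨s, hs, c, hc, h⟩
    rcases h with ((⟨h1,h2⟩|⟨h1,h2⟩)|⟨h1,h2⟩)|⟨h1,h2⟩
    · exact .inl <| .inl <| .inl ⟨⟨s, hs, h1⟩, ⟨c, hc, h2⟩⟩
    · exact .inl <| .inl <| .inr ⟨⟨s, hs, h1⟩, ⟨c, hc, h2⟩⟩
    · exact .inl <| .inr ⟨⟨s, hs, h1⟩, ⟨c, hc, h2⟩⟩
    · exact .inr ⟨⟨s, hs, h1⟩, ⟨c, hc, h2⟩⟩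
  · rintro (((⟨⟨s,hs,h1⟩,⟨c,hc,h2⟩⟩|⟨⟨s,hs,h1⟩,⟨c,hc,h2⟩⟩)|⟨⟨s,hs,h1⟩,⟨c,hc,h2⟩⟩)|⟨⟨s,hs,h1⟩,⟨c,hc,h2⟩⟩)
    · exact ⟨s, hs, c, hc, .inl <| .inl <| .inl ⟨h1, h2⟩⟩
    · exact ⟨s, hs, c, hc, .inl <| .inl <| .inr ⟨h1, h2⟩⟩
    · exact ⟨s, hs, c, hc, .inl <| .inr ⟨h1, h2⟩⟩
    · exact ⟨s, hs, c, hc, .inr ⟨h1, h2⟩⟩
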